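-- pv_equiv track=rewrite | github.com/Decaho7059/Academic-Years | Année 2020/Autumn 2020/ITI 1520/Laboratoires/Labo11_300094197/Exercice 1.py | verif_elem
-- ===== SOURCE A (Python) =====
-- def verif_elem(A,l):
--     '''(list,int)->bool
--     Verifie si tous les éléments de A sont entre 0 et 9
--     '''
--
--     if 0< (A[l-2] and A[l-1]) <=9:  #verif si le dernier est plus grand que le precedent
--         if (l==2): #condition initiale de passage
--             p = True
--         else:
--             p = verif_elem(A, l-1)  #appel recursif de la fonction
--     else:
--         p = False
--     return p #resultat "bool"
-- ===== SOURCE B (Python) =====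
-- def verif_elem(A, l):
--     '''(list,int)->bool
--     Verifie si tous les éléments de A sont entre 0 et 9
--     Version iterative: boucle while qui decremente l au lieu de la recursion.
--     '''
--     while True:
--         v = A[l-2] and A[l-1]
--         if not (0 < v <= 9):
--             return False
--         if l == 2:
--             return True
--         l -= 1
-- ===== Notes on version B (the rewrite author's own statement) =====
-- stated objective: alternative
-- what changed: Replaces the recursion with an explicit while-True loop that decrements l in place, computing the '(A[l-2] and A[l-1])' value into a named variable; same short-circuit, base case and exception behaviour (iterative vs recursive decomposition).
import Mathlib
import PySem

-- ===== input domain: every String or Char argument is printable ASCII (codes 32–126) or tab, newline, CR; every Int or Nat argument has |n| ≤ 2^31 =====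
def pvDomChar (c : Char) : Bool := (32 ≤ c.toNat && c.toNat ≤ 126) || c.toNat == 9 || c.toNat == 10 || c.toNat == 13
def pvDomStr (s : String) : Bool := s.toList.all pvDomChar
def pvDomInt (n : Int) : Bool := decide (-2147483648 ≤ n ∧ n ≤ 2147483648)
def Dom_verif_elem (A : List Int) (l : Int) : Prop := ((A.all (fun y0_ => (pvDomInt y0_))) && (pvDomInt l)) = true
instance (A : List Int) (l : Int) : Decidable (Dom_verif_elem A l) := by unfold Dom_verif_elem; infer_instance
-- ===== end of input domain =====

-- B replaces the recursion by an explicit while-True loop decrementing l in place, with the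
-- '(A[l-2] and A[l-1])' value named; same short-circuit and IndexError behaviour (both ports
-- return false exactly where their Python raises IndexError, at identical inputs).

-- ===== PORT A =====
-- Literal port of A's recursion: evaluate A[l-2] ('and' short-circuits when it is 0),
-- then A[l-1], check 0 < · ≤ 9 (chained comparison), base case l == 2, else recurse on l-1.
-- Where Python raises IndexError (pyGet? = none) the port returns false.
def verif_elem (A : List Int) (l : Int) : Bool :=
  match hidx : PySem.List.pyGet? A (l - 2) with
  | none => false                      -- IndexError on A[l-2]
  | some x =>
    if x = 0 then false                -- '(A[l-2] and A[l-1])' is 0, so 0 < 0 fails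
    else
      match PySem.List.pyGet? A (l - 1) with
      | none => false                  -- IndexError on A[l-1]
      | some y =>
        if 0 < y ∧ y ≤ 9 then
          if l = 2 then true
          else verif_elem A (l - 1)
        else false
termination_by (l + A.length).toNat
decreasing_by
  have hin : PySem.Raise.InRange A.length (l - 2) := by
    by_contra hc
    rw [← PySem.List.pyGet?_eq_none_iff (xs := A)] at hc
    simp [hidx] at hc
  simp [PySem.Raise.InRange] at hin
  omega

-- ===== PORT B =====
-- Literal port of Source B's while-True loop: one iteration computes v = A[l-2] and A[l-1]
-- (as an Option.bind: 'a and b' is a itself when a == 0, else b; none = IndexError, port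
-- returns false there), returns False unless 0 < v <= 9, returns True at l == 2, else the
-- loop continues with l-1 (the tail call is the next loop iteration).
def verif_elem_alt (A : List Int) (l : Int) : Bool :=
  match hv : (PySem.List.pyGet? A (l - 2)).bind
      (fun a => if a = 0 then some a else PySem.List.pyGet? A (l - 1)) with
  | none => false                      -- IndexError while computing v
  | some v =>
    if 0 < v ∧ v ≤ 9 then
      if l = 2 then true
      else verif_elem_alt A (l - 1)
    else false
termination_by (l + A.length).toNat
decreasing_by
  have hne : PySem.List.pyGet? A (l - 2) ≠ none := by
    intro h
    rw [h] at hv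
    simp at hv
  have hin : PySem.Raise.InRange A.length (l - 2) := by
    by_contra hc
    exact hne ((PySem.List.pyGet?_eq_none_iff A (l - 2)).mpr hc)
  simp [PySem.Raise.InRange] at hin
  omega

-- ===== PRECONDITION & SPEC =====
-- Pre_ is exactly where Python A returns normally (no IndexError): for l ≥ 2 the descent
-- stays in range (l ≤ len, or l = len+1 with A[len-1] == 0 short-circuiting to False);
-- for l < 2 the descent runs through negative-index wraparound and returns False iff some
-- step p fails its check (A[p] == 0 or A[(p+1) % len] not in 1..9) before the bottom.
def Pre_verif_elem (A : List Int) (l : Int) : Prop :=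
  if 2 ≤ l then
    l ≤ A.length ∨ (l = A.length + 1 ∧ 1 ≤ A.length ∧ A.getD (A.length - 1) 0 = 0)
  else
    ∃ p < (l + A.length - 1).toNat,
      A.getD p 0 = 0 ∨
        ¬(0 < A.getD ((p + 1) % A.length) 0 ∧ A.getD ((p + 1) % A.length) 0 ≤ 9)
instance (A : List Int) (l : Int) : Decidable (Pre_verif_elem A l) := by unfold Pre_verif_elem; infer_instance
def pvWitness_verif_elem : List Int × Int := ([3, 4, 5], 3)

def Spec_verif_elem (A : List Int) (l : Int) (out : Bool) : Prop := out = verif_elem_alt A l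
instance (A : List Int) (l : Int) (out : Bool) : Decidable (Spec_verif_elem A l out) := by unfold Spec_verif_elem; infer_instance

-- ===== CLAIM (what is proved, stated in full; the proofs are below) =====
def Claim_equal_verif_elem : Prop := ∀ (A : List Int) (l : Int), Dom_verif_elem A l → Pre_verif_elem A l → Spec_verif_elem A l (verif_elem A l)

-- ===== LEMMAS AND PROOFS =====

-- the two ports agree on every input (even where the Pythons raise, both ports give false)
theorem verif_elem_eq_alt (A : List Int) (l : Int) : verif_elem A l = verif_elem_alt A l := by
  fun_induction verif_elem A l with
  | case1 l hidx =>
    rw [verif_elem_alt]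
    split
    · rfl
    · rename_i v hv
      rw [hidx] at hv
      simp at hv
  | case2 l hidx =>
    rw [verif_elem_alt]
    split
    · rename_i hv
      simp [hidx] at hv
    · rename_i v hv
      simp [hidx] at hv
      subst hv
      norm_num
  | case3 l x hidx hx hnone =>
    rw [verif_elem_alt]
    split
    · rfl
    · rename_i v hv
      rw [hidx] at hv
      simp [hx, hnone] at hv
  | case4 x hx y hy hidx h1 =>
    rw [verif_elem_alt]
    norm_num at h1
    split
    · rename_i hv
      rw [hidx] at hv
      simp [hx] at hv
      rw [h1] at hv
      simp at hv
    · rename_i v hv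
      rw [hidx] at hv
      simp [hx] at hv
      rw [h1] at hv
      simp at hv
      subst hv
      simp [hy]
  | case5 l x hidx hx y h1 hy hne ih =>
    conv_rhs => rw [verif_elem_alt]
    split
    · rename_i hv
      rw [hidx] at hv
      simp [hx, h1] at hv
    · rename_i v hv
      rw [hidx] at hv
      simp [hx, h1] at hv
      subst hv
      simp [hy, hne, ih]
  | case6 l x hidx hx y h1 hy =>
    rw [verif_elem_alt]
    split
    · rfl
    · rename_i v hv
      rw [hidx] at hv
      simp [hx, h1] at hv
      subst hv
      rcases (not_and_or.mp hy) with h | h <;> simp [h]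

-- ===== VERDICT (by name: the statement is the Claim_ definition above) =====
-- the two ports agree on every input, so Pre_ (needed only because the Pythons raise
-- outside it) is not consumed by the proof
theorem verif_elem_spec : Claim_equal_verif_elem := by
  intro A l _ _
  exact verif_elem_eq_alt A l
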